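-- pv_equiv track=rewrite | github.com/MariaBlancoGonzalez/PraderWilli-Rehab | src/stats/calc.py | sumar_valores_misma_fecha
-- ===== SOURCE A (Python) =====
-- def sumar_valores_misma_fecha(fechas, errores, aciertos, tiempo):
--     fechas_sumadas = []
--     errores_sumados = []
--     aciertos_sumados = []
--     tiempo_sumado = []
--
--     valores_sumados = {}
--
--     for i in range(len(fechas)):
--         fecha = fechas[i]
--         valor_tiempo = tiempo[i]
--
--         clave = (fecha, valor_tiempo)
--
--         if clave in valores_sumados:
--             valores_sumados[clave][0] += errores[i]
--             valores_sumados[clave][1] += aciertos[i]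
--         else:
--             valores_sumados[clave] = [errores[i], aciertos[i]]
--
--     for clave, valores in valores_sumados.items():
--         fecha, valor_tiempo = clave
--
--         fechas_sumadas.append(fecha)
--         errores_sumados.append(valores[0])
--         aciertos_sumados.append(valores[1])
--         tiempo_sumado.append(valor_tiempo)
--
--     return fechas_sumadas, errores_sumados, aciertos_sumados, tiempo_sumado
-- ===== SOURCE B (Python) =====
-- def sumar_valores_misma_fecha(fechas, errores, aciertos, tiempo):
--     n = len(fechas)
--
--     # stage 1: the distinct (fecha, tiempo) keys, in first-occurrence order (no dict)
--     claves = []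
--     for i in range(n):
--         c = (fechas[i], tiempo[i])
--         if c not in claves:
--             claves.append(c)
--
--     fechas_sumadas = [c[0] for c in claves]
--     tiempo_sumado = [c[1] for c in claves]
--
--     # stage 2: for each distinct key, rescan the input and total its errores/aciertos
--     errores_sumados = []
--     aciertos_sumados = []
--     for c in claves:
--         e = 0
--         a = 0
--         for i in range(n):
--             if (fechas[i], tiempo[i]) == c:
--                 e += errores[i]
--                 a += aciertos[i]
--         errores_sumados.append(e)
--         aciertos_sumados.append(a)
--
--     return fechas_sumadas, errores_sumados, aciertos_sumados, tiempo_sumado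
-- ===== Notes on version B (the rewrite author's own statement) =====
-- stated objective: alternative
-- what changed: B removes A's dict of running [errores, aciertos] accumulators and its flatten pass entirely: it first collects the distinct (fecha, tiempo) keys in first-occurrence order with a list membership test, then for each distinct key rescans the whole input to total its errores and aciertos (per-key aggregation by filter-and-sum instead of incremental hashing); it trades A's O(n) hashing for an O(n*k) dict-free two-stage computation.
import Mathlib
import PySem

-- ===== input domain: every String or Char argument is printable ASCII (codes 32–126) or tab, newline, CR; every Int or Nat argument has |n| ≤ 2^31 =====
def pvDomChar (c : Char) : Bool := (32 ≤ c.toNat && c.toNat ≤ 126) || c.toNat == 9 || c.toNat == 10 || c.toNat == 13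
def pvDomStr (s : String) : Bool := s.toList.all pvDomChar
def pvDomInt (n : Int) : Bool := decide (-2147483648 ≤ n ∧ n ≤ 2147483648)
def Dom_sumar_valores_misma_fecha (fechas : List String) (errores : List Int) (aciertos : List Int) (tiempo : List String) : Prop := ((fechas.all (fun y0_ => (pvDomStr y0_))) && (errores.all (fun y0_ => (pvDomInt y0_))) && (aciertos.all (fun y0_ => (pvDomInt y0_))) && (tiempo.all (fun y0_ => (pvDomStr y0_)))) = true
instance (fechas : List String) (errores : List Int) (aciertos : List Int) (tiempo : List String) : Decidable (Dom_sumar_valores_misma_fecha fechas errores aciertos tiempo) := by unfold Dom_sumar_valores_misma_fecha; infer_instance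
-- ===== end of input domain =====

-- B replaces A's dict of running accumulators + flatten pass by a dict-free two-stage computation:
-- first the distinct (fecha, tiempo) keys in first-occurrence order, then a full rescan per key to
-- total its errores/aciertos (alternative decomposition, not claimed faster).

-- ===== PORT A =====
def sumar_valores_misma_fecha (fechas : List String) (errores : List Int) (aciertos : List Int) (tiempo : List String) : List String × List Int × List Int × List String :=
  -- for i in range(len(fechas)): accumulate per (fecha, tiempo) key into a dict of [errores, aciertos]
  let valores_sumados :=
    (PySem.List.pyRange 0 (fechas.length : Int) 1).foldl
      (fun (d : PySem.Dict (String × String) (Int × Int)) i =>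
        let fecha := PySem.List.pyGetD fechas i ""
        let valor_tiempo := PySem.List.pyGetD tiempo i ""
        let clave := (fecha, valor_tiempo)
        if d.contains clave then
          -- valores_sumados[clave][0] += errores[i]; valores_sumados[clave][1] += aciertos[i]
          let v := d.getD clave (0, 0)
          d.insert clave (v.1 + PySem.List.pyGetD errores i 0, v.2 + PySem.List.pyGetD aciertos i 0)
        else
          d.insert clave (PySem.List.pyGetD errores i 0, PySem.List.pyGetD aciertos i 0))
      PySem.Dict.empty
  -- for clave, valores in valores_sumados.items(): append to the four result lists
  valores_sumados.items.foldl
    (fun (acc : List String × List Int × List Int × List String) kv =>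
      (acc.1 ++ [kv.1.1], acc.2.1 ++ [kv.2.1], acc.2.2.1 ++ [kv.2.2], acc.2.2.2 ++ [kv.1.2]))
    ([], [], [], [])

-- ===== PORT B =====
def sumar_valores_misma_fecha_alt (fechas : List String) (errores : List Int) (aciertos : List Int) (tiempo : List String) : List String × List Int × List Int × List String :=
  let n : Int := (fechas.length : Int)
  -- stage 1: distinct (fecha, tiempo) keys in first-occurrence order ('c not in claves' list test)
  let claves :=
    (PySem.List.pyRange 0 n 1).foldl
      (fun (cl : List (String × String)) i =>
        let c := (PySem.List.pyGetD fechas i "", PySem.List.pyGetD tiempo i "")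
        if cl.contains c then cl else cl ++ [c])
      []
  let fechas_sumadas := claves.map (fun c => c.1)
  let tiempo_sumado := claves.map (fun c => c.2)
  -- stage 2: for each distinct key, rescan the input and total its errores/aciertos
  let ea :=
    claves.foldl
      (fun (acc : List Int × List Int) c =>
        let s :=
          (PySem.List.pyRange 0 n 1).foldl
            (fun (p : Int × Int) i =>
              if (PySem.List.pyGetD fechas i "", PySem.List.pyGetD tiempo i "") == c then
                (p.1 + PySem.List.pyGetD errores i 0, p.2 + PySem.List.pyGetD aciertos i 0)
              else p)
            (0, 0)
        (acc.1 ++ [s.1], acc.2 ++ [s.2]))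
      ([], [])
  (fechas_sumadas, ea.1, ea.2, tiempo_sumado)

-- ===== PRECONDITION & SPEC =====
-- Pre_ excludes exactly the inputs where Python A raises an IndexError: A indexes errores, aciertos
-- and tiempo at every i < len(fechas), so those three lists must be at least as long as fechas.
def Pre_sumar_valores_misma_fecha (fechas : List String) (errores : List Int) (aciertos : List Int) (tiempo : List String) : Prop :=
  fechas.length ≤ errores.length ∧ fechas.length ≤ aciertos.length ∧ fechas.length ≤ tiempo.length
instance (fechas : List String) (errores : List Int) (aciertos : List Int) (tiempo : List String) : Decidable (Pre_sumar_valores_misma_fecha fechas errores aciertos tiempo) := by unfold Pre_sumar_valores_misma_fecha; infer_instance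

def pvWitness_sumar_valores_misma_fecha : List String × List Int × List Int × List String :=
  (["2024-01-01", "2024-01-01", "2024-01-02"], [1, 2, 3], [4, 5, 6], ["30", "30", "60"])

def Spec_sumar_valores_misma_fecha (fechas : List String) (errores : List Int) (aciertos : List Int) (tiempo : List String) (out : List String × List Int × List Int × List String) : Prop := out = sumar_valores_misma_fecha_alt fechas errores aciertos tiempo
instance (fechas : List String) (errores : List Int) (aciertos : List Int) (tiempo : List String) (out : List String × List Int × List Int × List String) : Decidable (Spec_sumar_valores_misma_fecha fechas errores aciertos tiempo out) := by unfold Spec_sumar_valores_misma_fecha; infer_instance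

-- ===== CLAIM (what is proved, stated in full; the proofs are below) =====
def Claim_equal_sumar_valores_misma_fecha : Prop := ∀ (fechas : List String) (errores : List Int) (aciertos : List Int) (tiempo : List String), Dom_sumar_valores_misma_fecha fechas errores aciertos tiempo → Pre_sumar_valores_misma_fecha fechas errores aciertos tiempo → Spec_sumar_valores_misma_fecha fechas errores aciertos tiempo (sumar_valores_misma_fecha fechas errores aciertos tiempo)

-- ===== LEMMAS AND PROOFS =====

-- the common list of quadruples both loops traverse (under Pre_ it has length fechas.length)
def pvQuad (fe : List String) (er ac : List Int) (ti : List String) : List ((String × String) × (Int × Int)) :=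
  (fe.zip ti).zip (er.zip ac)

-- Nat-level form of the index loop over four parallel lists
theorem pvFoldQuadNat {σ : Type} (f : σ → String → Int → Int → String → σ)
    (fe : List String) (er ac : List Int) (ti : List String) (init : σ)
    (h1 : fe.length ≤ er.length) (h2 : fe.length ≤ ac.length) (h3 : fe.length ≤ ti.length) :
    (List.range fe.length).foldl
      (fun s k => f s (fe.getD k "") (er.getD k 0) (ac.getD k 0) (ti.getD k "")) init
    = (pvQuad fe er ac ti).foldl (fun s q => f s q.1.1 q.2.1 q.2.2 q.1.2) init := by
  induction fe generalizing er ac ti init with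
  | nil => simp [pvQuad]
  | cons x fe ih =>
      obtain ⟨e, er, rfl⟩ : ∃ e er', er = e :: er' := by
        cases er with
        | nil => simp at h1
        | cons e er => exact ⟨e, er, rfl⟩
      obtain ⟨a, ac, rfl⟩ : ∃ a ac', ac = a :: ac' := by
        cases ac with
        | nil => simp at h2
        | cons a ac => exact ⟨a, ac, rfl⟩
      obtain ⟨y, ti, rfl⟩ : ∃ y ti', ti = y :: ti' := by
        cases ti with
        | nil => simp at h3
        | cons y ti => exact ⟨y, ti, rfl⟩
      have hq : pvQuad (x :: fe) (e :: er) (a :: ac) (y :: ti)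
          = ((x, y), (e, a)) :: pvQuad fe er ac ti := by simp [pvQuad]
      simp only [List.length_cons, List.range_succ_eq_map, List.foldl_cons, List.foldl_map,
        List.getD_cons_zero, List.getD_cons_succ, hq]
      exact ih er ac ti _ (by simpa using h1) (by simpa using h2) (by simpa using h3)

-- the index loop over four parallel lists is the fold over the quadruple list
theorem pvFoldQuad {σ : Type} (f : σ → String → Int → Int → String → σ)
    (fe : List String) (er ac : List Int) (ti : List String) (init : σ)
    (h1 : fe.length ≤ er.length) (h2 : fe.length ≤ ac.length) (h3 : fe.length ≤ ti.length) :
    (PySem.List.pyRange 0 (fe.length : Int) 1).foldl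
      (fun s i => f s (PySem.List.pyGetD fe i "") (PySem.List.pyGetD er i 0)
                    (PySem.List.pyGetD ac i 0) (PySem.List.pyGetD ti i "")) init
    = (pvQuad fe er ac ti).foldl (fun s q => f s q.1.1 q.2.1 q.2.2 q.1.2) init := by
  rw [PySem.List.pyRange_one, List.foldl_map]
  have hn : ((fe.length : Int) - 0).toNat = fe.length := by omega
  rw [hn]
  simp only [Int.zero_add, PySem.List.pyGetD_natCast]
  exact pvFoldQuadNat f fe er ac ti init h1 h2 h3

-- A's second loop (flatten the dict) is the four projections of the items list
theorem pvFlatten_eq (M : List ((String × String) × (Int × Int)))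
    (f0 : List String) (e0 a0 : List Int) (t0 : List String) :
    M.foldl (fun (acc : List String × List Int × List Int × List String) kv =>
        (acc.1 ++ [kv.1.1], acc.2.1 ++ [kv.2.1], acc.2.2.1 ++ [kv.2.2], acc.2.2.2 ++ [kv.1.2]))
      (f0, e0, a0, t0)
    = (f0 ++ M.map (·.1.1), e0 ++ M.map (·.2.1), a0 ++ M.map (·.2.2), t0 ++ M.map (·.1.2)) := by
  induction M generalizing f0 e0 a0 t0 with
  | nil => simp
  | cons kv M ih => simp [ih]

-- A's loop body on a quadruple
def pvStepA (d : PySem.Dict (String × String) (Int × Int)) (q : (String × String) × (Int × Int)) :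
    PySem.Dict (String × String) (Int × Int) :=
  if d.contains q.1 then
    let v := d.getD q.1 (0, 0)
    d.insert q.1 (v.1 + q.2.1, v.2 + q.2.2)
  else
    d.insert q.1 q.2

-- B's stage 1: the distinct keys of L in first-occurrence order
def pvKeys (L : List ((String × String) × (Int × Int))) : List (String × String) :=
  L.foldl (fun cl q => if cl.contains q.1 then cl else cl ++ [q.1]) []

-- B's stage 2: the total (errores, aciertos) of key c over L
def pvSum (L : List ((String × String) × (Int × Int))) (c : String × String) : Int × Int :=
  L.foldl (fun p q => if q.1 == c then (p.1 + q.2.1, p.2 + q.2.2) else p) (0, 0)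

theorem pvMem_keyFold (L : List ((String × String) × (Int × Int)))
    (cl : List (String × String)) (x : String × String) :
    x ∈ L.foldl (fun cl q => if cl.contains q.1 then cl else cl ++ [q.1]) cl
      ↔ x ∈ cl ∨ x ∈ L.map (·.1) := by
  induction L generalizing cl with
  | nil => simp
  | cons q L ih =>
      simp only [List.foldl_cons]
      by_cases h : cl.contains q.1 = true
      · have hq : q.1 ∈ cl := by simpa using h
        rw [if_pos h, ih]
        simp only [List.map_cons, List.mem_cons]
        constructor
        · tauto
        · rintro (hx | rfl | hx)
          · tauto
          · exact Or.inl hq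
          · tauto
      · rw [if_neg h, ih]
        simp only [List.mem_append, List.map_cons, List.mem_cons]
        tauto

theorem pvNodup_keyFold (L : List ((String × String) × (Int × Int)))
    (cl : List (String × String)) (h : cl.Nodup) :
    (L.foldl (fun cl q => if cl.contains q.1 then cl else cl ++ [q.1]) cl).Nodup := by
  induction L generalizing cl with
  | nil => exact h
  | cons q L ih =>
      simp only [List.foldl_cons]
      by_cases hc : cl.contains q.1 = true
      · rw [if_pos hc]; exact ih cl h
      · rw [if_neg hc]
        have hq : q.1 ∉ cl := by simpa using hc
        exact ih _ (List.Nodup.append h (List.nodup_singleton _)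
          (fun a ha hb => hq ((List.mem_singleton.mp hb) ▸ ha)))

theorem pvSum_zero (L : List ((String × String) × (Int × Int))) (c : String × String)
    (h : ∀ q ∈ L, q.1 ≠ c) : pvSum L c = (0, 0) := by
  induction L with
  | nil => rfl
  | cons q L ih =>
      have hb : (q.1 == c) = false := by
        simpa using h q (List.mem_cons_self ..)
      show List.foldl _ (if (q.1 == c) = true then _ else (0, 0)) L = (0, 0)
      rw [hb, if_neg (by simp)]
      exact ih (fun p hp => h p (List.mem_cons_of_mem _ hp))

-- A's dict after folding L is exactly: B's distinct keys, each paired with B's total for it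
theorem pvInvA (L : List ((String × String) × (Int × Int))) :
    (L.foldl pvStepA PySem.Dict.empty).items = (pvKeys L).map (fun k => (k, pvSum L k)) := by
  induction L using List.reverseRecOn with
  | nil => rfl
  | append_singleton M q ih =>
      have hkeysD : (M.foldl pvStepA PySem.Dict.empty).keys = pvKeys M := by
        show (M.foldl pvStepA PySem.Dict.empty).items.map (·.1) = pvKeys M
        rw [ih]; exact (List.map_map ..).symm ▸ List.map_id _
      have hnd : (M.foldl pvStepA PySem.Dict.empty).keys.Nodup := by
        rw [hkeysD]; exact pvNodup_keyFold M [] List.nodup_nil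
      have hsum : ∀ k, pvSum (M ++ [q]) k
          = if q.1 == k then (( pvSum M k).1 + q.2.1, (pvSum M k).2 + q.2.2) else pvSum M k := by
        intro k; simp [pvSum, List.foldl_append]
      have hK : pvKeys (M ++ [q])
          = if (pvKeys M).contains q.1 then pvKeys M else pvKeys M ++ [q.1] := by
        simp [pvKeys, List.foldl_append]
      rw [List.foldl_append, List.foldl_cons, List.foldl_nil]
      by_cases hmem : q.1 ∈ pvKeys M
      · -- key already seen: A rewrites its entry in place, the key list is unchanged
        have hcont : (M.foldl pvStepA PySem.Dict.empty).contains q.1 = true := by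
          rw [PySem.Dict.contains_eq_decide_mem_keys, hkeysD]; simpa using hmem
        have hclcont : (pvKeys M).contains q.1 = true := by
          rw [← List.elem_eq_contains, List.elem_iff]; exact hmem
        have hgetD : (M.foldl pvStepA PySem.Dict.empty).getD q.1 (0, 0) = pvSum M q.1 := by
          refine PySem.Dict.getD_of_mem_items _ ?_ hnd (0, 0)
          rw [ih]; exact List.mem_map_of_mem hmem
        simp only [pvStepA, hcont, if_true, hgetD]
        rw [PySem.Dict.items_insert_of_contains _ _ hcont, ih, List.map_map, hK, hclcont,
          if_pos rfl]
        refine List.map_congr_left (fun k hk => ?_)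
        by_cases hkq : k = q.1
        · subst hkq; simp [Function.comp, hsum]
        · have hb1 : (k == q.1) = false := by simpa using hkq
          have hb2 : (q.1 == k) = false := by simpa using (Ne.symm hkq)
          simp [Function.comp, hsum, hb1, hb2]
      · -- fresh key: A appends the entry, B appends the key
        have hcont : (M.foldl pvStepA PySem.Dict.empty).contains q.1 = false := by
          rw [PySem.Dict.contains_eq_decide_mem_keys, hkeysD]; simpa using hmem
        have hclcont : (pvKeys M).contains q.1 = false := by
          rw [← List.elem_eq_contains]; simpa using hmem
        have hnotin : ∀ p ∈ M, p.1 ≠ q.1 := by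
          intro p hp hc
          exact hmem ((pvMem_keyFold M [] q.1).mpr (Or.inr (hc ▸ List.mem_map_of_mem hp)))
        simp only [pvStepA, hcont, Bool.false_eq_true, if_false]
        rw [PySem.Dict.items_insert_of_not_contains _ _ hcont, ih, hK, hclcont,
          if_neg (by simp), List.map_append]
        congr 1
        · refine List.map_congr_left (fun k hk => ?_)
          have hkq : q.1 ≠ k := fun hc => hmem (hc ▸ hk)
          have hb2 : (q.1 == k) = false := by simpa using hkq
          simp [hsum, hb2]
        · have : pvSum (M ++ [q]) q.1 = q.2 := by
            rw [hsum, if_pos (by simp), pvSum_zero M q.1 hnotin]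
            simp
          simp [this]

-- B's stage-2 loop appends one total per key: it is the two maps over the key list
theorem pvPairFold_eq (K : List (String × String)) (g : String × String → Int × Int)
    (e0 a0 : List Int) :
    K.foldl (fun (acc : List Int × List Int) c => (acc.1 ++ [(g c).1], acc.2 ++ [(g c).2]))
      (e0, a0)
    = (e0 ++ K.map (fun c => (g c).1), a0 ++ K.map (fun c => (g c).2)) := by
  induction K generalizing e0 a0 with
  | nil => simp
  | cons c K ih => simp [ih]

-- ===== VERDICT (by name: the statement is the Claim_ definition above) =====
theorem sumar_valores_misma_fecha_spec : Claim_equal_sumar_valores_misma_fecha := by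
  intro fe er ac ti _ hpre
  obtain ⟨h1, h2, h3⟩ := hpre
  unfold Spec_sumar_valores_misma_fecha
  -- A's first loop as a fold over the quadruple list
  have hqA := pvFoldQuad
      (fun (d : PySem.Dict (String × String) (Int × Int)) fecha err acc vt =>
        if d.contains (fecha, vt) then
          let v := d.getD (fecha, vt) (0, 0)
          d.insert (fecha, vt) (v.1 + err, v.2 + acc)
        else d.insert (fecha, vt) (err, acc))
      fe er ac ti PySem.Dict.empty h1 h2 h3
  have hA : sumar_valores_misma_fecha fe er ac ti
      = ((pvQuad fe er ac ti).foldl pvStepA PySem.Dict.empty).items.foldl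
          (fun (acc : List String × List Int × List Int × List String) kv =>
            (acc.1 ++ [kv.1.1], acc.2.1 ++ [kv.2.1], acc.2.2.1 ++ [kv.2.2], acc.2.2.2 ++ [kv.1.2]))
          ([], [], [], []) :=
    congrArg (fun d : PySem.Dict (String × String) (Int × Int) =>
        d.items.foldl (fun (acc : List String × List Int × List Int × List String)
            (kv : (String × String) × (Int × Int)) =>
          (acc.1 ++ [kv.1.1], acc.2.1 ++ [kv.2.1], acc.2.2.1 ++ [kv.2.2], acc.2.2.2 ++ [kv.1.2]))
          (([] : List String), ([] : List Int), ([] : List Int), ([] : List String))) hqA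
  -- B's stage-1 loop as the same fold
  have hqK := pvFoldQuad
      (fun (cl : List (String × String)) fecha _ _ vt =>
        if cl.contains (fecha, vt) then cl else cl ++ [(fecha, vt)])
      fe er ac ti [] h1 h2 h3
  -- B's inner rescan as the same fold, for every key c
  have hqS : ∀ c : String × String,
      (PySem.List.pyRange 0 (fe.length : Int) 1).foldl
        (fun (p : Int × Int) i =>
          if (PySem.List.pyGetD fe i "", PySem.List.pyGetD ti i "") == c then
            (p.1 + PySem.List.pyGetD er i 0, p.2 + PySem.List.pyGetD ac i 0)
          else p) (0, 0)
      = pvSum (pvQuad fe er ac ti) c := fun c =>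
    pvFoldQuad
      (fun (p : Int × Int) fecha err acc vt =>
        if (fecha, vt) == c then (p.1 + err, p.2 + acc) else p)
      fe er ac ti (0, 0) h1 h2 h3
  have hB : sumar_valores_misma_fecha_alt fe er ac ti
      = ((pvKeys (pvQuad fe er ac ti)).map (fun c => c.1),
         (pvKeys (pvQuad fe er ac ti)).map (fun c => (pvSum (pvQuad fe er ac ti) c).1),
         (pvKeys (pvQuad fe er ac ti)).map (fun c => (pvSum (pvQuad fe er ac ti) c).2),
         (pvKeys (pvQuad fe er ac ti)).map (fun c => c.2)) := by
    simp only [sumar_valores_misma_fecha_alt, hqK, hqS, pvPairFold_eq]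
    rfl
  rw [hA, hB, pvFlatten_eq, pvInvA]
  simp [List.map_map, Function.comp]
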